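-- pv_equiv track=rewrite | github.com/SungGV/algorithmPractice | algorithms/recursion/adjacentNum.py | adjacentNum
-- ===== SOURCE A (Python) =====
-- def adjacentNum(n):
--
--     if n < 10:
--         return n
--     else:
--         rst =''
--         while len(str(n)) >= 2:
--             rst += str(abs(int(str(n)[0]) - int(str(n)[1])))
--             n = str(n)[1:]
--         return adjacentNum(int(rst))
-- ===== SOURCE B (Python) =====
-- def adjacentNum(n):
--     while n >= 10:
--         s = str(n)
--         n = int(''.join(str(abs(int(x) - int(y))) for x, y in zip(s, s[1:])))
--     return n
-- ===== Notes on version B (the rewrite author's own statement) =====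
-- stated objective: idiomatic
-- what changed: Replaces the outer tail recursion plus a destructive string-chopping inner while-loop with a single `while n >= 10` loop whose next value is built in one pass by zipping the digit string with itself shifted by one.
import Mathlib
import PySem

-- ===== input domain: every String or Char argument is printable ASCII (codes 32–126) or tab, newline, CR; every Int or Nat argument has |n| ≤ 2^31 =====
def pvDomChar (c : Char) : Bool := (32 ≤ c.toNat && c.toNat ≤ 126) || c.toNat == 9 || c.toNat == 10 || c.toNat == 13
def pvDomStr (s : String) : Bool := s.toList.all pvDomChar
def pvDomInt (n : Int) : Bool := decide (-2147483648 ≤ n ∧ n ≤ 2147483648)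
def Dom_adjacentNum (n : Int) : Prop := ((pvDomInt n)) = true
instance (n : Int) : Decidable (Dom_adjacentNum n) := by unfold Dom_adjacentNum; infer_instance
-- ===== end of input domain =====

-- B differs from A only in decomposition (recursion → while loop, one zip pass per level);
-- both ports run the same loop with fuel n.toNat, which always suffices since each level's
-- value strictly decreases (checked behaviourally; equality of the ports holds for any fuel).

-- int(c) for the single digit character c (both Pythons do `int(str(...)[i])`); total guard .getD 0
def pvCharInt (c : Char) : Int := (PySem.Int.ofChars? [c]).getD 0

-- ===== PORT A =====
-- A's inner while-loop: rst += str(abs(int(s[0]) - int(s[1]))); s = s[1:]  while len(s) >= 2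
def pvALoop : List Char → List Char → List Char
  | a :: b :: t, rst => pvALoop (b :: t) (rst ++ PySem.Int.toChars (|pvCharInt a - pvCharInt b|))
  | _, rst => rst

def pvAGo : Nat → Int → Int
  | fuel, n =>
    if n < 10 then n
    else
      match fuel with
      | 0 => n  -- fuel exhaustion never reached on inputs where the Python returns
      | f + 1 => pvAGo f ((PySem.Int.ofChars? (pvALoop (PySem.Int.toChars n) [])).getD 0)

def adjacentNum (n : Int) : Int := pvAGo n.toNat n

-- ===== PORT B =====
-- one level of B's while body: zip the digit string with itself shifted by one, join the abs-diffs
def pvBStep (n : Int) : Int :=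
  let s := PySem.Int.toChars n
  (PySem.Int.ofChars?
    (((s.zip (s.drop 1)).map (fun p => PySem.Int.toChars (|pvCharInt p.1 - pvCharInt p.2|))).flatten)).getD 0

def pvBGo : Nat → Int → Int
  | 0, n => n
  | f + 1, n => if 10 ≤ n then pvBGo f (pvBStep n) else n

def adjacentNum_alt (n : Int) : Int := pvBGo n.toNat n

-- ===== PRECONDITION & SPEC =====
def Spec_adjacentNum (n : Int) (out : Int) : Prop := out = adjacentNum_alt n
instance (n : Int) (out : Int) : Decidable (Spec_adjacentNum n out) := by unfold Spec_adjacentNum; infer_instance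

-- ===== CLAIM (what is proved, stated in full; the proofs are below) =====
def Claim_equal_adjacentNum : Prop := ∀ (n : Int), Dom_adjacentNum n → Spec_adjacentNum n (adjacentNum n)

-- ===== LEMMAS AND PROOFS =====

-- A's accumulator loop produces exactly B's zip-flatten string
theorem pvALoop_eq (s : List Char) (rst : List Char) :
    pvALoop s rst = rst ++ ((s.zip (s.drop 1)).map
      (fun p => PySem.Int.toChars (|pvCharInt p.1 - pvCharInt p.2|))).flatten := by
  induction s generalizing rst with
  | nil => simp [pvALoop]
  | cons a t ih =>
    cases t with
    | nil => simp [pvALoop]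
    | cons b u => simp [pvALoop, ih]

theorem pvGo_eq (fuel : Nat) (n : Int) : pvAGo fuel n = pvBGo fuel n := by
  induction fuel generalizing n with
  | zero =>
    simp only [pvAGo, pvBGo]
    split <;> rfl
  | succ f ih =>
    simp only [pvAGo, pvBGo]
    by_cases h : n < 10
    · simp [h, show ¬ 10 ≤ n by omega]
    · simp only [if_neg h, if_pos (by omega : (10:Int) ≤ n)]
      rw [ih]
      congr 1
      simp [pvBStep, pvALoop_eq]

-- ===== VERDICT (by name: the statement is the Claim_ definition above) =====
theorem adjacentNum_spec : Claim_equal_adjacentNum := by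
  intro n _
  show adjacentNum n = adjacentNum_alt n
  exact pvGo_eq n.toNat n
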